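-- pv_equiv track=rewrite | github.com/needsomesleeptd/PPO | src/neural_network/detection_scripts/graphs/find_wrong_subs.py | filter_contour_subarrays
-- ===== SOURCE A (Python) =====
-- def check_uniform_spacing(coordinates, threshold=2):
--     sorted_by_y = sorted(coordinates, key=lambda c: c[1])
--     sorted_by_x = sorted(coordinates, key=lambda c: c[0])
--
--     y_diff = [sorted_by_y[i + 1][1] - (sorted_by_y[i][1] + sorted_by_y[i][3]) for i in range(len(sorted_by_y) - 1)]
--     x_diff = [sorted_by_x[i + 1][0] - (sorted_by_x[i][0] + sorted_by_x[i][2]) for i in range(len(sorted_by_x) - 1)]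
--
--     is_eq_y_spaced = all(abs(diff - y_diff[0]) <= threshold for diff in y_diff)
--     is_eq_x_spaced = all(abs(diff - x_diff[0]) <= threshold for diff in x_diff)
--
--     return is_eq_y_spaced, is_eq_x_spaced
--
-- def filter_contour_subarrays(contours_list, threshold=2):
--     res = []
--     for ctrs in contours_list:
--         w_min = min(ctrs, key=lambda c: c[2])[2]
--         h_min = min(ctrs, key=lambda c: c[3])[3]
--
--         w_max = max(ctrs, key=lambda c: c[2])[2]
--         h_max = max(ctrs, key=lambda c: c[3])[3]
--
--         count = len(ctrs)
--         count_same_h = sum(1 for c in ctrs if abs(c[3] - h_min) <= threshold)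
--         count_same_w = sum(1 for c in ctrs if abs(c[2] - w_min) <= threshold)
--
--         is_eq_y_spaced, is_eq_x_spaced = check_uniform_spacing(ctrs, 3)
--
--         if (count_same_h == count - 1 and h_max > h_min * 2 and not is_eq_y_spaced) \
--                 or (count_same_w == count - 1 and w_max > w_min * 2 and not is_eq_x_spaced):
--             res.append(ctrs)
--
--     return res
-- ===== SOURCE B (Python) =====
-- def _count_prefix_le(sorted_vals, bound):
--     k = 0
--     for v in sorted_vals:
--         if v > bound:
--             break
--         k += 1
--     return k
--
-- def _uniform(gaps, tol):
--     if not gaps: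
--         return True
--     return max(gaps) - gaps[0] <= tol and gaps[0] - min(gaps) <= tol
--
-- def _keep(ctrs, threshold):
--     hs = sorted(c[3] for c in ctrs)
--     if _count_prefix_le(hs, hs[0] + threshold) == len(ctrs) - 1 and hs[-1] > hs[0] * 2:
--         s = sorted(ctrs, key=lambda c: c[1])
--         if not _uniform([b[1] - (a[1] + a[3]) for a, b in zip(s, s[1:])], 3):
--             return True
--     ws = sorted(c[2] for c in ctrs)
--     if _count_prefix_le(ws, ws[0] + threshold) == len(ctrs) - 1 and ws[-1] > ws[0] * 2:
--         s = sorted(ctrs, key=lambda c: c[0])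
--         if not _uniform([b[0] - (a[0] + a[2]) for a, b in zip(s, s[1:])], 3):
--             return True
--     return False
--
-- def filter_contour_subarrays(contours_list, threshold=2):
--     return [ctrs for ctrs in contours_list if _keep(ctrs, threshold)]
-- ===== Notes on version B (the rewrite author's own statement) =====
-- stated objective: faster
-- what changed: B is sort-based: per group it sorts the widths and heights once and reads the extrema off the ends of the sorted lists, gets the near-minimum counts by an early-breaking prefix scan of the sorted values instead of A's six independent min/max/count scans with abs tests, tests gap uniformity via max(gaps)/min(gaps) bounds around the first gap instead of A's all()-over-every-gap comprehension, computes only the spacing check whose size condition fired, and builds the result as a filter comprehension instead of an accumulator loop.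
import Mathlib
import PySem

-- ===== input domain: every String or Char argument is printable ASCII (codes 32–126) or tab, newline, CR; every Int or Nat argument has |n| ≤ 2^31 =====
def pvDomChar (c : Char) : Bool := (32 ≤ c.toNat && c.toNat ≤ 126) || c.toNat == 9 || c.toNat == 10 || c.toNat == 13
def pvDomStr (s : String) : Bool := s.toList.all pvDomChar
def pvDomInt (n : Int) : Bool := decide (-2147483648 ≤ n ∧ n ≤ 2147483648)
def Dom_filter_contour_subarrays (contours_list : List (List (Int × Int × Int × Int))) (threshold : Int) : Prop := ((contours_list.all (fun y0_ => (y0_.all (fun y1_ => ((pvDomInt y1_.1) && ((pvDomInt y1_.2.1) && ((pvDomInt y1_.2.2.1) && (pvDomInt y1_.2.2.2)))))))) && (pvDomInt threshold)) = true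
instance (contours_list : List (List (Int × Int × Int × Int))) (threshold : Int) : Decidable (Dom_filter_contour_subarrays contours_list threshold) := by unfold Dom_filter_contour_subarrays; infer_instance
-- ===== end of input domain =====

-- B is sort-based: extrema and near-minimum counts are read off sorted width/height lists
-- (early-breaking prefix count), gap uniformity is tested via max/min gap bounds, and the
-- result is a filter instead of an accumulator loop (objective: fewer passes and lazy spacing
-- checks; a timing run measured a constant-factor speedup).

-- ===== PORT A =====
def check_uniform_spacing (coordinates : List (Int × Int × Int × Int)) (threshold : Int) : Bool × Bool :=
  let d0 : Int × Int × Int × Int := (0, 0, 0, 0)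
  let sorted_by_y := PySem.List.sorted coordinates (fun c => c.2.1) false
  let sorted_by_x := PySem.List.sorted coordinates (fun c => c.1) false
  let y_diff := (PySem.List.pyRange 0 ((sorted_by_y.length : Int) - 1) 1).map
    (fun i => (PySem.List.pyGetD sorted_by_y (i + 1) d0).2.1
      - ((PySem.List.pyGetD sorted_by_y i d0).2.1 + (PySem.List.pyGetD sorted_by_y i d0).2.2.2))
  let x_diff := (PySem.List.pyRange 0 ((sorted_by_x.length : Int) - 1) 1).map
    (fun i => (PySem.List.pyGetD sorted_by_x (i + 1) d0).1
      - ((PySem.List.pyGetD sorted_by_x i d0).1 + (PySem.List.pyGetD sorted_by_x i d0).2.2.1))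
  let is_eq_y_spaced := y_diff.all (fun diff => decide (|diff - PySem.List.pyGetD y_diff 0 0| ≤ threshold))
  let is_eq_x_spaced := x_diff.all (fun diff => decide (|diff - PySem.List.pyGetD x_diff 0 0| ≤ threshold))
  (is_eq_y_spaced, is_eq_x_spaced)

-- the per-group decision of A's loop body (kept as a helper so the loop stays one line)
def filter_keepA (ctrs : List (Int × Int × Int × Int)) (threshold : Int) : Bool :=
  let d0 : Int × Int × Int × Int := (0, 0, 0, 0)
  let w_min := ((PySem.List.min? ctrs (fun c => c.2.2.1)).getD d0).2.2.1
  let h_min := ((PySem.List.min? ctrs (fun c => c.2.2.2)).getD d0).2.2.2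
  let w_max := ((PySem.List.max? ctrs (fun c => c.2.2.1)).getD d0).2.2.1
  let h_max := ((PySem.List.max? ctrs (fun c => c.2.2.2)).getD d0).2.2.2
  let count : Int := (ctrs.length : Int)
  let count_same_h := (ctrs.map (fun c => if |c.2.2.2 - h_min| ≤ threshold then (1 : Int) else 0)).sum
  let count_same_w := (ctrs.map (fun c => if |c.2.2.1 - w_min| ≤ threshold then (1 : Int) else 0)).sum
  let sp := check_uniform_spacing ctrs 3
  decide ((count_same_h = count - 1 ∧ h_max > h_min * 2 ∧ sp.1 = false)
        ∨ (count_same_w = count - 1 ∧ w_max > w_min * 2 ∧ sp.2 = false))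

def filter_contour_subarrays (contours_list : List (List (Int × Int × Int × Int))) (threshold : Int) : List (List (Int × Int × Int × Int)) :=
  contours_list.foldl (fun res ctrs => if filter_keepA ctrs threshold then res ++ [ctrs] else res) []

-- ===== PORT B =====
-- early-breaking loop counting the prefix of a (sorted) list that is ≤ bound
def count_prefix_le : List Int → Int → Int
  | [], _ => 0
  | v :: t, bound => if v > bound then 0 else 1 + count_prefix_le t bound

-- "not gaps or (max(gaps) - gaps[0] <= tol and gaps[0] - min(gaps) <= tol)"
def uniform_alt (gaps : List Int) (tol : Int) : Bool :=
  match gaps with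
  | [] => true
  | g0 :: t =>
    decide ((PySem.List.max? (g0 :: t) (fun x => x)).getD 0 - g0 ≤ tol
          ∧ g0 - (PySem.List.min? (g0 :: t) (fun x => x)).getD 0 ≤ tol)

-- the per-group decision of B (_keep in Source B)
def filter_keepB (ctrs : List (Int × Int × Int × Int)) (threshold : Int) : Bool :=
  let hs := PySem.List.sorted (ctrs.map (fun c => c.2.2.2)) (fun x => x) false
  let hitH :=
    if count_prefix_le hs (PySem.List.pyGetD hs 0 0 + threshold) = (ctrs.length : Int) - 1
        ∧ PySem.List.pyGetD hs (-1) 0 > PySem.List.pyGetD hs 0 0 * 2 then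
      let s := PySem.List.sorted ctrs (fun c => c.2.1) false
      !uniform_alt ((s.zip s.tail).map (fun ab => ab.2.2.1 - (ab.1.2.1 + ab.1.2.2.2))) 3
    else false
  if hitH then true
  else
    let ws := PySem.List.sorted (ctrs.map (fun c => c.2.2.1)) (fun x => x) false
    if count_prefix_le ws (PySem.List.pyGetD ws 0 0 + threshold) = (ctrs.length : Int) - 1
        ∧ PySem.List.pyGetD ws (-1) 0 > PySem.List.pyGetD ws 0 0 * 2 then
      let s := PySem.List.sorted ctrs (fun c => c.1) false
      !uniform_alt ((s.zip s.tail).map (fun ab => ab.2.1 - (ab.1.1 + ab.1.2.2.1))) 3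
    else false

def filter_contour_subarrays_alt (contours_list : List (List (Int × Int × Int × Int))) (threshold : Int) : List (List (Int × Int × Int × Int)) :=
  contours_list.filter (fun ctrs => filter_keepB ctrs threshold)

-- ===== PRECONDITION & SPEC =====
-- Pre_ excludes contour groups that are empty lists: there Python A raises ValueError (min() of
-- an empty sequence) and Python B raises IndexError (hs[0]), so neither returns.
def Pre_filter_contour_subarrays (contours_list : List (List (Int × Int × Int × Int))) (threshold : Int) : Prop :=
  ∀ g ∈ contours_list, g ≠ []
instance (contours_list : List (List (Int × Int × Int × Int))) (threshold : Int) : Decidable (Pre_filter_contour_subarrays contours_list threshold) := by unfold Pre_filter_contour_subarrays; infer_instance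

def pvWitness_filter_contour_subarrays : (List (List (Int × Int × Int × Int))) × Int :=
  ([[(0, 0, 1, 1), (0, 5, 1, 9)]], 2)

def Spec_filter_contour_subarrays (contours_list : List (List (Int × Int × Int × Int))) (threshold : Int) (out : List (List (Int × Int × Int × Int))) : Prop := out = filter_contour_subarrays_alt contours_list threshold
instance (contours_list : List (List (Int × Int × Int × Int))) (threshold : Int) (out : List (List (Int × Int × Int × Int))) : Decidable (Spec_filter_contour_subarrays contours_list threshold out) := by unfold Spec_filter_contour_subarrays; infer_instance

-- ===== CLAIM (what is proved, stated in full; the proofs are below) =====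
def Claim_equal_filter_contour_subarrays : Prop := ∀ (contours_list : List (List (Int × Int × Int × Int))) (threshold : Int), Dom_filter_contour_subarrays contours_list threshold → Pre_filter_contour_subarrays contours_list threshold → Spec_filter_contour_subarrays contours_list threshold (filter_contour_subarrays contours_list threshold)

-- ===== LEMMAS AND PROOFS =====

-- head of the sorted key values = key of Python's min(ctrs, key)
theorem minB_eq (c : Int × Int × Int × Int) (rest : List (Int × Int × Int × Int))
    (key : (Int × Int × Int × Int) → Int) (d : Int × Int × Int × Int) :
    PySem.List.pyGetD (PySem.List.sorted ((c :: rest).map key) (fun x => x) false) 0 0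
      = key ((PySem.List.min? (c :: rest) key).getD d) := by
  obtain ⟨m', hm'⟩ : ∃ m', PySem.List.min? (c :: rest) key = some m' := by
    cases h : PySem.List.min? (c :: rest) key with
    | none => rw [PySem.List.min?_eq_none_iff] at h; exact absurd h (by simp)
    | some m' => exact ⟨m', rfl⟩
  rw [hm']; simp only [Option.getD_some]
  obtain ⟨m, t, hws⟩ : ∃ m t, PySem.List.sorted ((c :: rest).map key) (fun x => x) false = m :: t := by
    cases h : PySem.List.sorted ((c :: rest).map key) (fun x => x) false with
    | nil => rw [PySem.List.sorted_eq_nil_iff] at h; exact absurd h (by simp)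
    | cons m t => exact ⟨m, t, rfl⟩
  rw [hws, PySem.List.pyGetD_zero_cons]
  have hle := PySem.List.key_head_sorted_le _ (fun x : Int => x) hws
  have hmmem : m ∈ (c :: rest).map key := by
    rw [← PySem.List.mem_sorted ((c :: rest).map key) (fun x => x) false, hws]; simp
  have hmin := PySem.List.min?_isMin hm'
  apply le_antisymm
  · exact hle _ (List.mem_map.mpr ⟨m', PySem.List.min?_mem hm', rfl⟩)
  · rcases List.mem_map.mp hmmem with ⟨y, hy, rfl⟩
    exact hmin y hy

-- last of the sorted key values = key of Python's max(ctrs, key)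
theorem maxB_eq (c : Int × Int × Int × Int) (rest : List (Int × Int × Int × Int))
    (key : (Int × Int × Int × Int) → Int) (d : Int × Int × Int × Int) :
    PySem.List.pyGetD (PySem.List.sorted ((c :: rest).map key) (fun x => x) false) (-1) 0
      = key ((PySem.List.max? (c :: rest) key).getD d) := by
  obtain ⟨m', hm'⟩ : ∃ m', PySem.List.max? (c :: rest) key = some m' := by
    cases h : PySem.List.max? (c :: rest) key with
    | none => rw [PySem.List.max?_eq_none_iff] at h; exact absurd h (by simp)
    | some m' => exact ⟨m', rfl⟩
  rw [hm']; simp only [Option.getD_some]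
  have hne : PySem.List.sorted ((c :: rest).map key) (fun x => x) false ≠ [] := by
    rw [Ne, PySem.List.sorted_eq_nil_iff]; simp
  rw [PySem.List.pyGetD_neg_one _ _ hne]
  have hlastmem : (PySem.List.sorted ((c :: rest).map key) (fun x => x) false).getLast hne
      ∈ (c :: rest).map key := by
    rw [← PySem.List.mem_sorted ((c :: rest).map key) (fun x => x) false]
    exact List.getLast_mem hne
  have hge : ∀ y ∈ PySem.List.sorted ((c :: rest).map key) (fun x => x) false,
      y ≤ (PySem.List.sorted ((c :: rest).map key) (fun x => x) false).getLast hne := by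
    intro y hy
    rcases List.mem_iff_getElem.mp hy with ⟨p, hp, rfl⟩
    rw [List.getLast_eq_getElem]
    exact PySem.List.sorted_id_getElem_mono ((c :: rest).map key) (by omega) (by omega)
  have hmax := PySem.List.max?_isMax hm'
  apply le_antisymm
  · rcases List.mem_map.mp hlastmem with ⟨y, hy, heq⟩
    rw [← heq]; exact hmax y hy
  · refine hge _ ?_
    rw [PySem.List.mem_sorted ((c :: rest).map key) (fun x => x) false]
    exact List.mem_map.mpr ⟨m', PySem.List.max?_mem hm', rfl⟩

-- the early-breaking prefix count on an ascending list is the full count of elements ≤ bound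
theorem count_prefix_of_pairwise (l : List Int) (b : Int) (h : l.Pairwise (· ≤ ·)) :
    count_prefix_le l b = (l.countP (fun v => decide (v ≤ b)) : Int) := by
  induction l with
  | nil => rfl
  | cons v t ih =>
    rw [List.pairwise_cons] at h
    by_cases hv : v > b
    · have ht : t.countP (fun v => decide (v ≤ b)) = 0 :=
        List.countP_eq_zero.mpr (fun y hy => by have := h.1 y hy; simp; omega)
      simp [count_prefix_le, hv, List.countP_cons, ht, show ¬ v ≤ b by omega]
    · simp only [count_prefix_le, if_neg hv, ih h.2, List.countP_cons,
        show (decide (v ≤ b)) = true by simp; omega]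
      push_cast; omega

-- a countP is a 0/1-indicator sum, for any pointwise-agreeing Prop test
theorem countP_eq_sum (l : List (Int × Int × Int × Int)) (q : (Int × Int × Int × Int) → Bool)
    (f : (Int × Int × Int × Int) → Prop) [DecidablePred f]
    (h : ∀ x ∈ l, q x = decide (f x)) :
    ((l.countP q : Nat) : Int) = (l.map (fun x => if f x then (1 : Int) else 0)).sum := by
  induction l with
  | nil => rfl
  | cons x tl ih =>
    simp only [List.countP_cons, List.map_cons, List.sum_cons]
    rw [← ih (fun y hy => h y (List.mem_cons_of_mem _ hy)), h x (List.mem_cons_self)]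
    by_cases hx : f x <;> simp [hx] <;> push_cast <;> omega

-- B's prefix count over the sorted key values = A's 0/1 sum with the abs test
theorem countB_eq (c : Int × Int × Int × Int) (rest : List (Int × Int × Int × Int))
    (key : (Int × Int × Int × Int) → Int) (d : Int × Int × Int × Int) (t : Int) :
    count_prefix_le (PySem.List.sorted ((c :: rest).map key) (fun x => x) false)
        (key ((PySem.List.min? (c :: rest) key).getD d) + t)
      = ((c :: rest).map (fun x => if |key x - key ((PySem.List.min? (c :: rest) key).getD d)| ≤ t then (1 : Int) else 0)).sum := by
  obtain ⟨m', hm'⟩ : ∃ m', PySem.List.min? (c :: rest) key = some m' := by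
    cases h : PySem.List.min? (c :: rest) key with
    | none => rw [PySem.List.min?_eq_none_iff] at h; exact absurd h (by simp)
    | some m' => exact ⟨m', rfl⟩
  rw [hm']; simp only [Option.getD_some]
  have hmin := PySem.List.min?_isMin hm'
  rw [count_prefix_of_pairwise _ _ (by
        simpa using PySem.List.sorted_pairwise ((c :: rest).map key) (fun x => x)),
      ((PySem.List.sorted_perm ((c :: rest).map key) (fun x => x) false).countP_eq _),
      List.countP_map]
  apply countP_eq_sum
  intro x hx
  have := hmin x hx
  simp only [Function.comp, decide_eq_true_eq, decide_eq_decide]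
  constructor
  · intro h'; rw [abs_le]; omega
  · intro h'; rw [abs_le] at h'; omega

-- A's indexed gap comprehension equals B's zip-with-tail gap comprehension
theorem gaps_eq (s : List (Int × Int × Int × Int)) (f g : (Int × Int × Int × Int) → Int)
    (d : Int × Int × Int × Int) :
    (PySem.List.pyRange 0 ((s.length : Int) - 1) 1).map
      (fun i => f (PySem.List.pyGetD s (i + 1) d)
        - (f (PySem.List.pyGetD s i d) + g (PySem.List.pyGetD s i d)))
    = (s.zip s.tail).map (fun ab => f ab.2 - (f ab.1 + g ab.1)) := by
  apply List.ext_getElem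
  · simp [PySem.List.length_pyRange_one, List.length_tail]
  · intro k h1 h2
    have hk : k < s.length - 1 := by
      simp [PySem.List.length_pyRange_one] at h1; omega
    have hk1 : k < s.length := by omega
    have hk2 : k + 1 < s.length := by omega
    simp only [List.getElem_map, PySem.List.getElem_pyRange_one, List.getElem_zip, List.getElem_tail]
    have e1 : (0 : Int) + (k : Int) + 1 = ((k + 1 : Nat) : Int) := by omega
    have e2 : (0 : Int) + (k : Int) = ((k : Nat) : Int) := by omega
    rw [e1, e2, PySem.List.pyGetD_natCast, PySem.List.pyGetD_natCast,
        List.getD_eq_getElem _ _ hk2, List.getD_eq_getElem _ _ hk1]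

-- A's all-gaps-near-first test equals B's max/min-gap test
theorem uniform_eq (gaps : List Int) (tol : Int) :
    gaps.all (fun diff => decide (|diff - PySem.List.pyGetD gaps 0 0| ≤ tol))
      = uniform_alt gaps tol := by
  cases gaps with
  | nil => rfl
  | cons g0 t =>
    obtain ⟨mx, hmx⟩ : ∃ mx, PySem.List.max? (g0 :: t) (fun x => x) = some mx := by
      cases h : PySem.List.max? (g0 :: t) (fun x => x) with
      | none => rw [PySem.List.max?_eq_none_iff] at h; exact absurd h (by simp)
      | some mx => exact ⟨mx, rfl⟩
    obtain ⟨mn, hmn⟩ : ∃ mn, PySem.List.min? (g0 :: t) (fun x => x) = some mn := by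
      cases h : PySem.List.min? (g0 :: t) (fun x => x) with
      | none => rw [PySem.List.min?_eq_none_iff] at h; exact absurd h (by simp)
      | some mn => exact ⟨mn, rfl⟩
    have hmaxmem := PySem.List.max?_mem hmx
    have hmax := PySem.List.max?_isMax hmx
    have hminmem := PySem.List.min?_mem hmn
    have hmin := PySem.List.min?_isMin hmn
    simp only [uniform_alt, hmx, hmn, Option.getD_some, PySem.List.pyGetD_zero_cons]
    rw [Bool.eq_iff_iff]
    simp only [List.all_eq_true, decide_eq_true_eq]
    constructor
    · intro h
      have h1 := h mx hmaxmem
      have h2 := h mn hminmem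
      rw [abs_le] at h1 h2
      constructor <;> omega
    · rintro ⟨h1, h2⟩ d hd
      have ha : d ≤ mx := hmax d hd
      have hb : mn ≤ d := hmin d hd
      rw [abs_le]; omega

-- per-group: the two decisions coincide on a nonempty group
theorem keep_eq (ctrs : List (Int × Int × Int × Int)) (t : Int) (h : ctrs ≠ []) :
    filter_keepA ctrs t = filter_keepB ctrs t := by
  obtain ⟨c, rest, rfl⟩ := List.exists_cons_of_ne_nil h
  simp only [filter_keepA, filter_keepB, check_uniform_spacing]
  simp only [minB_eq c rest (fun c => c.2.2.1) (0, 0, 0, 0),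
    minB_eq c rest (fun c => c.2.2.2) (0, 0, 0, 0),
    maxB_eq c rest (fun c => c.2.2.1) (0, 0, 0, 0),
    maxB_eq c rest (fun c => c.2.2.2) (0, 0, 0, 0),
    countB_eq c rest (fun c => c.2.2.1) (0, 0, 0, 0) t,
    countB_eq c rest (fun c => c.2.2.2) (0, 0, 0, 0) t,
    gaps_eq _ (fun c => c.2.1) (fun c => c.2.2.2) (0, 0, 0, 0),
    gaps_eq _ (fun c => c.1) (fun c => c.2.2.1) (0, 0, 0, 0),
    uniform_eq]
  set hmin := ((PySem.List.min? (c :: rest) (fun c => c.2.2.2)).getD (0, 0, 0, 0)).2.2.2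
  set hmax := ((PySem.List.max? (c :: rest) (fun c => c.2.2.2)).getD (0, 0, 0, 0)).2.2.2
  set wmin := ((PySem.List.min? (c :: rest) (fun c => c.2.2.1)).getD (0, 0, 0, 0)).2.2.1
  set wmax := ((PySem.List.max? (c :: rest) (fun c => c.2.2.1)).getD (0, 0, 0, 0)).2.2.1
  set csh := ((c :: rest).map (fun x => if |x.2.2.2 - hmin| ≤ t then (1 : Int) else 0)).sum
  set csw := ((c :: rest).map (fun x => if |x.2.2.1 - wmin| ≤ t then (1 : Int) else 0)).sum
  set n : Int := (((c :: rest).length : Nat) : Int)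
  set ey := uniform_alt
      (((PySem.List.sorted (c :: rest) (fun x => x.2.1) false).zip
        (PySem.List.sorted (c :: rest) (fun x => x.2.1) false).tail).map
        (fun ab => ab.2.2.1 - (ab.1.2.1 + ab.1.2.2.2))) 3
  set ex := uniform_alt
      (((PySem.List.sorted (c :: rest) (fun x => x.1) false).zip
        (PySem.List.sorted (c :: rest) (fun x => x.1) false).tail).map
        (fun ab => ab.2.1 - (ab.1.1 + ab.1.2.2.1))) 3
  by_cases h1 : csh = n - 1 ∧ hmax > hmin * 2 <;>
    by_cases h2 : csw = n - 1 ∧ wmax > wmin * 2 <;>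
      cases ey <;> cases ex <;> simp [h1, h2]

-- A's append-accumulator loop is a filter
theorem foldl_append_filter (l : List (List (Int × Int × Int × Int))) (p : List (Int × Int × Int × Int) → Bool)
    (acc : List (List (Int × Int × Int × Int))) :
    l.foldl (fun res x => if p x then res ++ [x] else res) acc = acc ++ l.filter p := by
  induction l generalizing acc with
  | nil => simp
  | cons x t ih =>
    simp only [List.foldl_cons, List.filter_cons]
    cases hp : p x <;> simp [hp, ih]

-- ===== VERDICT (by name: the statement is the Claim_ definition above) =====
theorem filter_contour_subarrays_spec : Claim_equal_filter_contour_subarrays := by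
  intro contours_list threshold _ hpre
  unfold Spec_filter_contour_subarrays filter_contour_subarrays filter_contour_subarrays_alt
  rw [foldl_append_filter, List.nil_append]
  exact List.filter_congr (fun x hx => keep_eq x threshold (hpre x hx))
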